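-- pv_equiv track=rewrite | github.com/HyunjoonKwak/lotto_manager_web | lotto_dashboard/app/utils/recommend.py | _validate_combo
-- ===== SOURCE A (Python) =====
-- from typing import List, Set, Tuple, Dict
--
-- def _validate_combo(nums: Set[int]) -> bool:
--     if len(nums) != 6:
--         return False
--     arr = sorted(nums)
--     consec = sum(1 for i in range(1,6) if arr[i] == arr[i-1]+1)
--     if consec > 2:
--         return False
--     odd = sum(1 for x in arr if x % 2 == 1)
--     if odd in (0,1,5,6):
--         return False
--     return True
-- ===== SOURCE B (Python) =====
-- def _validate_combo(nums):
--     if len(nums) != 6: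
--         return False
--     consec = odd = 0
--     for x in nums:
--         if x + 1 in nums:
--             consec += 1
--         if x % 2 == 1:
--             odd += 1
--     return consec <= 2 and 2 <= odd <= 4
-- ===== Notes on version B (the rewrite author's own statement) =====
-- stated objective: simpler
-- what changed: Drops the sort and the two staged generator passes: one fold over the set accumulates both the consecutive count (by membership probes (x+1) in nums instead of adjacent entries of a sorted array) and the odd count, and the rejection tuple is replaced by the equivalent range test 2 <= odd <= 4.
import Mathlib
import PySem

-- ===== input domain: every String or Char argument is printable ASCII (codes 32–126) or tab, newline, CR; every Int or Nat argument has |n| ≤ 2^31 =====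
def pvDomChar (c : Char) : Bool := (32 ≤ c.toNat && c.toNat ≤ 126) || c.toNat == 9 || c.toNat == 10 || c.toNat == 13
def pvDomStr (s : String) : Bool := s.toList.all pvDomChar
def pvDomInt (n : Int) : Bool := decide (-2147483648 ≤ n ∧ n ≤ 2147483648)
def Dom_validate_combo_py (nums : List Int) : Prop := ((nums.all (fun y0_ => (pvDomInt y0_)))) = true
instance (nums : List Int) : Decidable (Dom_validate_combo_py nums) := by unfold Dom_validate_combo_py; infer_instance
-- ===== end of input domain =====

-- B drops the sort and the staged generator passes: one accumulator fold counts consecutive pairs by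
-- membership probes and odd numbers together, and the rejection tuple becomes a range test (objective: simpler).
-- ===== PORT A =====
def validate_combo_py (nums : List Int) : Bool :=
  if nums.length ≠ 6 then false
  else
    let arr := PySem.List.sorted nums (fun x => x) false
    let consec : Int := ((PySem.List.pyRange 1 6 1).map
      (fun i => if PySem.List.pyGetD arr i 0 = PySem.List.pyGetD arr (i - 1) 0 + 1 then (1 : Int) else 0)).sum
    if consec > 2 then false
    else
      let odd : Int := (arr.map (fun x => if PySem.Int.mod x 2 = 1 then (1 : Int) else 0)).sum
      if odd = 0 ∨ odd = 1 ∨ odd = 5 ∨ odd = 6 then false else true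

-- ===== PORT B =====
def validate_combo_py_alt (nums : List Int) : Bool :=
  if nums.length ≠ 6 then false
  else
    let st := nums.foldl (fun (st : Int × Int) x =>
      ((if (x + 1) ∈ nums then st.1 + 1 else st.1),
       (if PySem.Int.mod x 2 = 1 then st.2 + 1 else st.2))) (0, 0)
    decide (st.1 ≤ 2) && (decide (2 ≤ st.2) && decide (st.2 ≤ 4))

-- ===== PRECONDITION & SPEC =====
-- The Python argument is a SET of ints; per the type convention the list holds its distinct elements.
def Pre_validate_combo_py (nums : List Int) : Prop := nums.Nodup
instance (nums : List Int) : Decidable (Pre_validate_combo_py nums) := by unfold Pre_validate_combo_py; infer_instance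
def pvWitness_validate_combo_py : List Int := [2, 3, 7, 10, 15, 20]

def Spec_validate_combo_py (nums : List Int) (out : Bool) : Prop := out = validate_combo_py_alt nums
instance (nums : List Int) (out : Bool) : Decidable (Spec_validate_combo_py nums out) := by unfold Spec_validate_combo_py; infer_instance

-- ===== CLAIM (what is proved, stated in full; the proofs are below) =====
def Claim_equal_validate_combo_py : Prop := ∀ (nums : List Int), Dom_validate_combo_py nums → Pre_validate_combo_py nums → Spec_validate_combo_py nums (validate_combo_py nums)

-- ===== LEMMAS AND PROOFS =====

-- B's fold computes the pair of indicator sums.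
theorem fold_pair (nums l : List Int) (c o : Int) :
    l.foldl (fun (st : Int × Int) x =>
      ((if (x + 1) ∈ nums then st.1 + 1 else st.1),
       (if PySem.Int.mod x 2 = 1 then st.2 + 1 else st.2))) (c, o)
    = (c + (l.map (fun x => if (x + 1) ∈ nums then (1 : Int) else 0)).sum,
       o + (l.map (fun x => if PySem.Int.mod x 2 = 1 then (1 : Int) else 0)).sum) := by
  induction l generalizing c o with
  | nil => simp
  | cons y t ih =>
    rw [List.foldl_cons, ih]
    simp only [List.map_cons, List.sum_cons, Prod.mk.injEq]
    by_cases h1 : (y + 1) ∈ nums <;> by_cases h2 : PySem.Int.mod y 2 = 1 <;>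
      [simp only [if_pos h1, if_pos h2]; simp only [if_pos h1, if_neg h2];
       simp only [if_neg h1, if_pos h2]; simp only [if_neg h1, if_neg h2]] <;>
      exact ⟨by ring, by ring⟩

-- The odd-indicator sum is between 0 and the length of the list.
theorem odd_sum_bounds (l : List Int) :
    0 ≤ (l.map (fun x => if PySem.Int.mod x 2 = 1 then (1 : Int) else 0)).sum ∧
    (l.map (fun x => if PySem.Int.mod x 2 = 1 then (1 : Int) else 0)).sum ≤ (l.length : Int) := by
  induction l with
  | nil => simp
  | cons y t ih =>
    simp only [List.map_cons, List.sum_cons, List.length_cons]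
    by_cases h : PySem.Int.mod y 2 = 1 <;> [rw [if_pos h]; rw [if_neg h]] <;>
      push_cast <;> omega

-- On a strictly increasing 6-list, adjacent-pair count = membership-probe count.
set_option maxHeartbeats 1000000 in
theorem consec_sorted_eq_probe (a b c d e f : Int)
    (h : ([a, b, c, d, e, f] : List Int).Pairwise (· < ·)) :
    (((PySem.List.pyRange 1 6 1).map
      (fun i => if PySem.List.pyGetD ([a, b, c, d, e, f] : List Int) i 0
                  = PySem.List.pyGetD ([a, b, c, d, e, f] : List Int) (i - 1) 0 + 1 then (1 : Int) else 0)).sum)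
    = (([a, b, c, d, e, f] : List Int).map
      (fun x => if (x + 1) ∈ ([a, b, c, d, e, f] : List Int) then (1 : Int) else 0)).sum := by
  simp only [List.pairwise_cons, List.mem_cons, List.not_mem_nil, or_false] at h
  obtain ⟨h1, h2, h3, h4, h5, -⟩ := h
  have hr : PySem.List.pyRange 1 6 1 = [1, 2, 3, 4, 5] := by decide
  rw [hr]
  simp only [List.map_cons, List.map_nil, List.sum_cons, List.sum_nil, List.mem_cons, List.not_mem_nil]
  norm_num only
  have ab : a < b := h1 b (by tauto)
  have bc : b < c := h2 c (by tauto)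
  have cd : c < d := h3 d (by tauto)
  have de : d < e := h4 e (by tauto)
  have ef : e < f := h5 f (by tauto)
  clear h1 h2 h3 h4 h5 hr
  simp [PySem.List.pyGetD, PySem.List.pyGet?, PySem.List.pyIdx?]
  rw [if_congr (show (a+1=b ∨ a+1=c ∨ a+1=d ∨ a+1=e ∨ a+1=f) ↔ b = a+1 by omega) rfl rfl,
      if_congr (show (b+1=a ∨ b+1=c ∨ b+1=d ∨ b+1=e ∨ b+1=f) ↔ c = b+1 by omega) rfl rfl,
      if_congr (show (c+1=a ∨ c+1=b ∨ c+1=d ∨ c+1=e ∨ c+1=f) ↔ d = c+1 by omega) rfl rfl,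
      if_congr (show (d+1=a ∨ d+1=b ∨ d+1=c ∨ d+1=e ∨ d+1=f) ↔ e = d+1 by omega) rfl rfl,
      if_congr (show (e+1=a ∨ e+1=b ∨ e+1=c ∨ e+1=d ∨ e+1=f) ↔ f = e+1 by omega) rfl rfl,
      if_neg (show ¬(f+1=a ∨ f+1=b ∨ f+1=c ∨ f+1=d ∨ f+1=e) by omega)]
  ring

theorem consec_eq_probe (nums arr : List Int) (hperm : arr.Perm nums)
    (hplt : arr.Pairwise (· < ·)) (hlar : arr.length = 6) :
    (((PySem.List.pyRange 1 6 1).map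
      (fun i => if PySem.List.pyGetD arr i 0 = PySem.List.pyGetD arr (i - 1) 0 + 1 then (1 : Int) else 0)).sum)
    = ((nums.map (fun x => if (x + 1) ∈ nums then (1 : Int) else 0)).sum) := by
  have hmemf : (fun x => if (x + 1) ∈ nums then (1 : Int) else 0)
      = (fun x => if (x + 1) ∈ arr then (1 : Int) else 0) := by
    funext x; exact if_congr (hperm.mem_iff).symm rfl rfl
  rw [hmemf, ← (hperm.map (fun x => if (x + 1) ∈ arr then (1 : Int) else 0)).sum_eq]
  match arr, hlar with
  | [a, b, c, d, e, f], _ => exact consec_sorted_eq_probe a b c d e f hplt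

theorem validate_combo_eq (nums : List Int) (hnd : nums.Nodup) :
    validate_combo_py nums = validate_combo_py_alt nums := by
  unfold validate_combo_py validate_combo_py_alt
  by_cases hlen : nums.length = 6
  · simp only [hlen, ne_eq, not_true_eq_false, if_false]
    have hperm : (PySem.List.sorted nums (fun x => x) false).Perm nums :=
      PySem.List.sorted_perm nums (fun x => x) false
    have hndar : (PySem.List.sorted nums (fun x => x) false).Nodup := hperm.nodup_iff.mpr hnd
    have hple : (PySem.List.sorted nums (fun x => x) false).Pairwise (fun a b => a ≤ b) :=
      PySem.List.sorted_pairwise nums (fun x => x)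
    have hplt : (PySem.List.sorted nums (fun x => x) false).Pairwise (· < ·) :=
      (List.Pairwise.and hple hndar).imp (fun h => lt_of_le_of_ne h.1 h.2)
    have hlar : (PySem.List.sorted nums (fun x => x) false).length = 6 := by
      rw [hperm.length_eq, hlen]
    have hc := consec_eq_probe nums (PySem.List.sorted nums (fun x => x) false) hperm hplt hlar
    have hodd : ((PySem.List.sorted nums (fun x => x) false).map
        (fun x => if PySem.Int.mod x 2 = 1 then (1 : Int) else 0)).sum
        = (nums.map (fun x => if PySem.Int.mod x 2 = 1 then (1 : Int) else 0)).sum :=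
      (hperm.map _).sum_eq
    rw [fold_pair]
    set C := ((nums.map (fun x => if (x + 1) ∈ nums then (1 : Int) else 0)).sum) with hC
    set O := ((nums.map (fun x => if PySem.Int.mod x 2 = 1 then (1 : Int) else 0)).sum) with hO
    have hob := odd_sum_bounds nums
    rw [hlen] at hob
    rw [hc, hodd]
    simp only [zero_add]
    by_cases hcs : C > 2
    · simp [hcs, show ¬ C ≤ 2 by omega]
    · simp only [hcs, if_false]
      by_cases ho : O = 0 ∨ O = 1 ∨ O = 5 ∨ O = 6 <;>
        simp [ho, show C ≤ 2 by omega] <;> omega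
  · simp [hlen]

-- ===== VERDICT (by name: the statement is the Claim_ definition above) =====
theorem validate_combo_py_spec : Claim_equal_validate_combo_py := by
  intro nums _ hpre
  exact validate_combo_eq nums hpre
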